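-- pv_equiv track=rewrite | github.com/picoCTF/start-problem-dev | example-problems/crypto-oracle/helper.py | int2ascii
-- ===== SOURCE A (Python) =====
-- def int2ascii(integer):
--     newtext = ""
--     while integer > 0:
--         currentchar = integer % 256
--         newtext = chr(currentchar) + newtext
--         integer -= currentchar
--         integer = integer // 256
--     return(newtext)
-- ===== SOURCE B (Python) =====
-- def int2ascii(integer):
--     if integer <= 0:
--         return ""
--     n = (integer.bit_length() + 7) // 8
--     return integer.to_bytes(n, 'big').decode('latin-1')
-- ===== Notes on version B (the rewrite author's own statement) =====
-- stated objective: idiomatic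
-- what changed: Replaces the digit-by-digit base-256 while loop with a single int.to_bytes of the minimal byte length followed by a latin-1 decode.
import Mathlib
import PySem

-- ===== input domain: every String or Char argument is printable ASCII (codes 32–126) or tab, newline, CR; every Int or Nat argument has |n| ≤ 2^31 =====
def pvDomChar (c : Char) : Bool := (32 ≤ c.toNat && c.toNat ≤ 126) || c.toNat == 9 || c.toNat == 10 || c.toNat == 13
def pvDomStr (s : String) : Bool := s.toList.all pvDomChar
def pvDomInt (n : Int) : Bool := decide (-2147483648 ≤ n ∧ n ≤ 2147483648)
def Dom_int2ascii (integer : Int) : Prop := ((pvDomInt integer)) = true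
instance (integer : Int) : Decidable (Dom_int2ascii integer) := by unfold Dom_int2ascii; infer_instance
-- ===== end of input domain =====

-- B replaces A's digit-by-digit base-256 while loop by one minimal-length big-endian
-- byte conversion (int.to_bytes + latin-1 decode); objective: idiomatic.

-- ===== PORT A =====
-- the while loop of A: state (integer, newtext); terminates because integer strictly decreases
def int2asciiLoop (integer : Int) (newtext : String) : String :=
  if _h : integer > 0 then
    let currentchar := PySem.Int.mod integer 256
    int2asciiLoop (PySem.Int.floordiv (integer - currentchar) 256)
      (String.ofList [Char.ofNat currentchar.toNat] ++ newtext)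
  else newtext
termination_by integer.toNat
decreasing_by
  have h1 : 0 ≤ PySem.Int.mod integer 256 := PySem.Int.mod_nonneg integer (by norm_num)
  have h2 : PySem.Int.floordiv (integer - PySem.Int.mod integer 256) 256
      = (integer - PySem.Int.mod integer 256) / 256 :=
    PySem.Int.floordiv_eq_ediv_of_pos (by norm_num)
  have h3 : PySem.Int.mod integer 256 < 256 := PySem.Int.mod_lt integer (by norm_num)
  have h4 := PySem.Int.floordiv_mul_add_mod integer 256
  simp only [h2]
  omega

def int2ascii (integer : Int) : String := int2asciiLoop integer ""

-- ===== PORT B =====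
-- big-endian bytes of m over exactly n bytes (= int.to_bytes(n, 'big'), each byte decoded latin-1)
def bytesBE (m : Nat) : Nat → List Char
  | 0 => []
  | k + 1 => bytesBE (m / 256) k ++ [Char.ofNat (m % 256)]

def int2ascii_alt (integer : Int) : String :=
  if integer ≤ 0 then ""
  else
    let n := (PySem.Int.bitLength integer + 7) / 8
    String.ofList (bytesBE integer.toNat n)

-- ===== PRECONDITION & SPEC =====
def Spec_int2ascii (integer : Int) (out : String) : Prop := out = int2ascii_alt integer
instance (integer : Int) (out : String) : Decidable (Spec_int2ascii integer out) := by unfold Spec_int2ascii; infer_instance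

-- ===== CLAIM (what is proved, stated in full; the proofs are below) =====
def Claim_equal_int2ascii : Prop := ∀ (integer : Int), Dom_int2ascii integer → Spec_int2ascii integer (int2ascii integer)

-- ===== LEMMAS AND PROOFS =====

-- big-endian base-256 digits of m, no leading zeros
def digitsBE (m : Nat) : List Char :=
  if m = 0 then [] else digitsBE (m / 256) ++ [Char.ofNat (m % 256)]
decreasing_by exact Nat.div_lt_self (by omega) (by norm_num)

theorem digitsBE_zero : digitsBE 0 = [] := by unfold digitsBE; simp

theorem digitsBE_pos {m : Nat} (h : m ≠ 0) :
    digitsBE m = digitsBE (m / 256) ++ [Char.ofNat (m % 256)] := by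
  conv_lhs => unfold digitsBE
  simp [h]

-- A's loop accumulates exactly the base-256 digits of integer.toNat in front of the accumulator
theorem int2asciiLoop_eq (m : Nat) : ∀ acc : List Char,
    int2asciiLoop (m : Int) (String.ofList acc) = String.ofList (digitsBE m ++ acc) := by
  induction m using Nat.strong_induction_on with
  | _ m ih =>
    intro acc
    by_cases hm : m = 0
    · subst hm
      unfold int2asciiLoop
      simp [digitsBE_zero]
    · unfold int2asciiLoop
      have hpos : (m : Int) > 0 := by exact_mod_cast Nat.pos_of_ne_zero hm
      have hmod : PySem.Int.mod (m : Int) 256 = ((m % 256 : Nat) : Int) :=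
        PySem.Int.mod_natCast m 256
      have hsub : (m : Int) - ((m % 256 : Nat) : Int) = ((m - m % 256 : Nat) : Int) := by
        have := Nat.mod_le m 256
        push_cast [this]; ring
      have hdiv : PySem.Int.floordiv ((m - m % 256 : Nat) : Int) (256 : Int)
          = (((m - m % 256) / 256 : Nat) : Int) := by
        exact_mod_cast PySem.Int.floordiv_natCast (m - m % 256) 256
      have hq : (m - m % 256) / 256 = m / 256 := by omega
      simp only [hpos, dif_pos, hmod, hsub, hdiv, hq]
      have hlt : m / 256 < m := Nat.div_lt_self (Nat.pos_of_ne_zero hm) (by norm_num)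
      simp only [Int.toNat_natCast]
      rw [show String.ofList [Char.ofNat (m % 256)] ++ String.ofList acc
            = String.ofList (Char.ofNat (m % 256) :: acc) from String.ofList_append.symm,
          ih (m / 256) hlt (Char.ofNat (m % 256) :: acc),
          digitsBE_pos hm, List.append_assoc]
      simp

-- padding to the exact length adds nothing: bytesBE m n = digitsBE m when 256^(n-1) ≤ m < 256^n
theorem bytesBE_eq_digitsBE : ∀ (n m : Nat), m < 256 ^ n → (n ≠ 0 → 256 ^ (n - 1) ≤ m) →
    bytesBE m n = digitsBE m := by
  intro n
  induction n with
  | zero =>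
    intro m h _
    interval_cases m
    simp [bytesBE, digitsBE_zero]
  | succ k ih =>
    intro m h hlo
    have hlo' : 256 ^ k ≤ m := by simpa using hlo (by omega)
    have hm : m ≠ 0 := by
      have : 0 < 256 ^ k := Nat.pow_pos (show 0 < 256 by norm_num)
      omega
    rw [show bytesBE m (k + 1) = bytesBE (m / 256) k ++ [Char.ofNat (m % 256)] from rfl,
        digitsBE_pos hm]
    congr 1
    apply ih
    · have : m < 256 ^ k * 256 := by rw [← pow_succ]; exact h
      exact Nat.div_lt_of_lt_mul (by omega)
    · intro hk
      have hk1 : 256 ^ (k - 1) * 256 = 256 ^ k := by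
        rw [← pow_succ]; congr 1; omega
      apply Nat.le_div_iff_mul_le (by norm_num) |>.mpr
      omega

-- Python's bit_length on a positive Nat is log2 + 1
theorem bitLength_eq_log2 (m : Nat) (hm : m ≠ 0) :
    PySem.Int.bitLength (m : Int) = Nat.log2 m + 1 := by
  induction m using Nat.strong_induction_on with
  | _ m ih =>
    by_cases h1 : m = 1
    · subst h1; decide
    · have h2 : 2 ≤ m := by omega
      rw [PySem.Int.bitLength_natCast (by omega), ih (m / 2) (by omega) (by omega)]
      have hd : Nat.log 2 (m / 2) = Nat.log 2 m - 1 := Nat.log_div_base 2 m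
      have hp : 0 < Nat.log 2 m := Nat.log_pos (by norm_num) h2
      simp only [Nat.log2_eq_log_two]
      omega

-- the minimal byte count brackets m between consecutive powers of 256
theorem bracket (m : Nat) (hm : m ≠ 0) :
    m < 256 ^ ((Nat.log2 m + 8) / 8) ∧
    ((Nat.log2 m + 8) / 8 ≠ 0 → 256 ^ ((Nat.log2 m + 8) / 8 - 1) ≤ m) := by
  set b := Nat.log2 m with hb
  have h1 : 2 ^ b ≤ m := Nat.log2_self_le hm
  have h2 : m < 2 ^ (b + 1) := Nat.lt_log2_self
  have hq : (b + 8) / 8 = b / 8 + 1 := by omega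
  constructor
  · rw [hq]
    have he : 256 ^ (b / 8 + 1) = 2 ^ (8 * (b / 8 + 1)) := by
      rw [show (256 : Nat) = 2 ^ 8 from rfl, ← pow_mul]
    rw [he]
    have hle : b + 1 ≤ 8 * (b / 8 + 1) := by omega
    exact h2.trans_le (Nat.pow_le_pow_right (by norm_num) hle)
  · intro _
    rw [hq]
    simp only [Nat.add_sub_cancel]
    have he : 256 ^ (b / 8) = 2 ^ (8 * (b / 8)) := by
      rw [show (256 : Nat) = 2 ^ 8 from rfl, ← pow_mul]
    rw [he]
    exact (Nat.pow_le_pow_right (by norm_num) (by omega)).trans h1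

-- ===== VERDICT (by name: the statement is the Claim_ definition above) =====
theorem int2ascii_spec : Claim_equal_int2ascii := by
  intro integer _
  unfold Spec_int2ascii int2ascii int2ascii_alt
  by_cases hle : integer ≤ 0
  · simp only [hle, if_pos]
    unfold int2asciiLoop
    have : ¬ integer > 0 := by omega
    simp [this]
  · simp only [hle, if_neg, not_false_iff]
    have hpos : 0 < integer := by omega
    set m := integer.toNat with hm
    have hcast : (m : Int) = integer := Int.toNat_of_nonneg (by omega)
    have hm0 : m ≠ 0 := by omega
    rw [← hcast, show ("" : String) = String.ofList [] from rfl, int2asciiLoop_eq m [],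
        bitLength_eq_log2 m hm0]
    have hb := bracket m hm0
    have hshow : Nat.log2 m + 1 + 7 = Nat.log2 m + 8 := by omega
    rw [hshow, ← bytesBE_eq_digitsBE _ _ hb.1 hb.2]
    simp
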